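-- pv_equiv track=rewrite | github.com/kilianovski/study | numbers/E.py | klever_permutation
-- ===== SOURCE A (Python) =====
-- def klever_permutation(n,k):
--     p = [-1 for _ in range(n)]
--     i = 0
--     start = 1
--
--     for a in range(1, n+1):
--         p[i] = a
--
--
--         if i + k < n:
--             i = i + k
--         else:
--             i = start
--             start += 1
--
--     return p
-- ===== SOURCE B (Python) =====
-- def klever_permutation(n, k):
--     # Closed form: position i holds (i % k) * q + min(i % k, r) + i // k + 1,
--     # where q, r = divmod(n, k): the chains for residues < i%k contribute
--     # (i%k)*q + min(i%k, r) values, and i is the (i//k)-th cell of its chain.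
--     q, r = divmod(n, k)
--     return [(i % k) * q + min(i % k, r) + i // k + 1 for i in range(n)]
-- ===== Notes on version B (the rewrite author's own statement) =====
-- stated objective: simpler
-- what changed: B replaces A's stateful moving-pointer traversal (pointer, start, wrap bookkeeping, n sequential writes) by a closed-form arithmetic formula computing each position's value directly from one divmod(n,k).
-- outside the precondition, e.g. on klever_permutation(3, 0): A returns [3, -1, -1], B raises ZeroDivisionError; on klever_permutation(4, -1): A returns [1, 4, 3, 2], B returns [1, 0, -1, -2]
import Mathlib
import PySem

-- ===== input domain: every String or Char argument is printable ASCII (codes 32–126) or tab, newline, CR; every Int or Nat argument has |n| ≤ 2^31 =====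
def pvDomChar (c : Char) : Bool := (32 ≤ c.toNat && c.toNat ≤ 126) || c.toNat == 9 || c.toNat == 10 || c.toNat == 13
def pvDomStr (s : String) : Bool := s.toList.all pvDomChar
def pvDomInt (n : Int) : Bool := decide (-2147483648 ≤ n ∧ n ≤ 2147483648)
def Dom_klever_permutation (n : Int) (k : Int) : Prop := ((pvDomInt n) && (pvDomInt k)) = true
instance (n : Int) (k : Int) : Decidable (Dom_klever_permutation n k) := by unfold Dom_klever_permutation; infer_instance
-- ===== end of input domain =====

-- B computes the permutation by a closed-form per-position formula from one divmod(n,k)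
-- instead of A's moving-pointer traversal; objective: simpler. Equal on Pre_.


-- ===== PORT A =====
-- one iteration of A's `for a in range(1, n+1)` loop; state = some (p, i, start), none = IndexError raised
def kpStepA (n k : Int) (st : Option (List Int × Int × Int)) (a : Int) : Option (List Int × Int × Int) :=
  match st with
  | none => none
  | some (p, i, start) =>
    match PySem.List.pySet? p i a with          -- p[i] = a  (Python: negative index wraps, out of range raises)
    | none => none
    | some p' => if i + k < n then some (p', i + k, start) else some (p', start, start + 1)

def klever_permutation (n : Int) (k : Int) : List Int :=
  -- p = [-1 for _ in range(n)]; i = 0; start = 1; then the loop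
  match (PySem.List.pyRange 1 (n + 1) 1).foldl (kpStepA n k) (some (List.replicate n.toNat (-1), 0, 1)) with
  | some (p, _, _) => p
  | none => []     -- Python raises IndexError here; such inputs are outside Pre_

-- ===== PORT B =====
def klever_permutation_alt (n : Int) (k : Int) : List Int :=
  -- q, r = divmod(n, k); return [(i % k) * q + min(i % k, r) + i // k + 1 for i in range(n)]
  match PySem.Int.divmod? n k with
  | none => []     -- Python raises ZeroDivisionError here (k = 0); such inputs are outside Pre_
  | some (q, r) =>
    (PySem.List.pyRange 0 n 1).map (fun i =>
      (PySem.Int.mod i k) * q + min (PySem.Int.mod i k) r + PySem.Int.floordiv i k + 1)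

-- ===== PRECONDITION & SPEC =====
-- Pre_ excludes k ≤ 0 with n > 0: there A's value (k = 0 overwrites p[0] n times; negative k
-- writes through Python's negative-index wraparound or raises IndexError) is an accident of the
-- pointer arithmetic and no stride-k filling is specified; B raises ZeroDivisionError (k = 0)
-- or returns a different arithmetic artefact there. (n ≤ 0 with k ≠ 0 is kept: both return [].)
def Pre_klever_permutation (n : Int) (k : Int) : Prop := 1 ≤ k ∨ (n ≤ 0 ∧ k < 0)
instance (n : Int) (k : Int) : Decidable (Pre_klever_permutation n k) := by unfold Pre_klever_permutation; infer_instance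
def pvWitness_klever_permutation : Int × Int := (5, 2)
def Spec_klever_permutation (n : Int) (k : Int) (out : List Int) : Prop := out = klever_permutation_alt n k
instance (n : Int) (k : Int) (out : List Int) : Decidable (Spec_klever_permutation n k out) := by unfold Spec_klever_permutation; infer_instance

-- ===== CLAIM (what is proved, stated in full; the proofs are below) =====
def Claim_equal_klever_permutation : Prop := ∀ (n : Int) (k : Int), Dom_klever_permutation n k → Pre_klever_permutation n k → Spec_klever_permutation n k (klever_permutation n k)

-- ===== LEMMAS AND PROOFS =====

-- ghost re-statement of A's traversal, chain by chain (proof-only; neither port uses it):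
-- kpFill walks one stride-k chain, kpFold folds the chains for the offsets 0, …, min k n − 1
def kpFill (fuel : Nat) (n k : Int) (p : List Int) (a i : Int) : List Int × Int :=
  match fuel with
  | 0 => (p, a)
  | fuel + 1 =>
    if i < n then kpFill fuel n k (p.set i.toNat a) (a + 1) (i + k)
    else (p, a)

def kpFold (n k : Int) : List Int × Int :=
  (PySem.List.pyRange 0 (min k n) 1).foldl
    (fun st s => kpFill n.toNat n k st.1 st.2 s)
    (List.replicate n.toNat (-1), 1)

theorem kpSet_some (p : List Int) (i v : Int) (h0 : 0 ≤ i) (h1 : i < (p.length : Int)) :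
    PySem.List.pySet? p i v = some (p.set i.toNat v) := by
  have h := PySem.List.pySet?_natCast (xs := p) (v := v) (n := i.toNat) (by omega)
  rwa [Int.toNat_of_nonneg h0] at h

theorem kpFill_succ (f : Nat) (n k : Int) (p : List Int) (a i : Int) :
    kpFill (f + 1) n k p a i
      = if i < n then kpFill f n k (p.set i.toNat a) (a + 1) (i + k) else (p, a) := rfl

theorem kpFill_length : ∀ (fuel : Nat) (n k : Int) (p : List Int) (a i : Int),
    (kpFill fuel n k p a i).1.length = p.length := by
  intro fuel
  induction fuel with
  | zero => intro n k p a i; rfl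
  | succ f ih =>
    intro n k p a i
    rw [kpFill_succ]
    split_ifs with h
    · rw [ih]; simp
    · rfl

theorem kpFill_le : ∀ (fuel : Nat) (n k : Int) (p : List Int) (a i : Int),
    a ≤ (kpFill fuel n k p a i).2 := by
  intro fuel
  induction fuel with
  | zero => intro n k p a i; exact le_refl a
  | succ f ih =>
    intro n k p a i
    rw [kpFill_succ]
    split_ifs with h
    · exact le_trans (by omega) (ih n k (p.set i.toNat a) (a + 1) (i + k))
    · exact le_refl a

-- the counter after one chain: number of indices i, i+k, i+2k, … below n is (n-1-i)/k + 1
theorem kpFill_snd (n k : Int) (hk : 1 ≤ k) : ∀ (fuel : Nat) (p : List Int) (a i : Int),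
    0 ≤ i → i < n → n.toNat - i.toNat ≤ fuel →
    (kpFill fuel n k p a i).2 = a + ((n - 1 - i) / k + 1) := by
  intro fuel
  induction fuel with
  | zero => intro p a i h0 h1 h2; exact absurd h2 (by omega)
  | succ f ih =>
    intro p a i h0 h1 h2
    rw [kpFill_succ, if_pos h1]
    by_cases hik : i + k < n
    · rw [ih (p.set i.toNat a) (a + 1) (i + k) (by omega) hik (by omega)]
      have hdiv : (n - 1 - i) / k = (n - 1 - (i + k)) / k + 1 := by
        have h := Int.add_mul_ediv_right (n - 1 - (i + k)) 1 (show k ≠ 0 by omega)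
        rw [one_mul] at h
        rw [show n - 1 - i = n - 1 - (i + k) + k by ring, h]
      omega
    · have hstop : kpFill f n k (p.set i.toNat a) (a + 1) (i + k) = (p.set i.toNat a, a + 1) := by
        cases f with
        | zero => rfl
        | succ f' => rw [kpFill_succ, if_neg hik]
      rw [hstop]
      have hz : (n - 1 - i) / k = 0 := Int.ediv_eq_zero_of_lt (by omega) (by omega)
      rw [hz]
      omega

-- A's loop, run over the values a, a+1, … that one chain consumes, performs exactly that chain's
-- writes and then moves the pointer to (start, start+1)
theorem kp_chain (n k : Int) (hk : 1 ≤ k) : ∀ (fuel : Nat) (p : List Int) (a i st : Int),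
    0 ≤ i → i < n → (p.length : Int) = n → n.toNat - i.toNat ≤ fuel + 1 →
    (PySem.List.pyRange a (kpFill (fuel + 1) n k p a i).2 1).foldl (kpStepA n k) (some (p, i, st))
      = some ((kpFill (fuel + 1) n k p a i).1, st, st + 1) := by
  intro fuel
  induction fuel with
  | zero =>
    intro p a i st h0 h1 hlen hfuel
    have hik : ¬ (i + k < n) := by omega
    rw [kpFill_succ, if_pos h1]
    rw [show kpFill 0 n k (p.set i.toNat a) (a + 1) (i + k) = (p.set i.toNat a, a + 1) from rfl]
    rw [PySem.List.pyRange_one_singleton]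
    simp only [List.foldl_cons, List.foldl_nil]
    simp [kpStepA, kpSet_some p i a h0 (by omega), if_neg hik]
  | succ f ih =>
    intro p a i st h0 h1 hlen hfuel
    have hset := kpSet_some p i a h0 (by omega)
    rw [kpFill_succ, if_pos h1]
    by_cases hik : i + k < n
    · have hcnt : a + 1 ≤ (kpFill (f + 1) n k (p.set i.toNat a) (a + 1) (i + k)).2 :=
        kpFill_le (f + 1) n k (p.set i.toNat a) (a + 1) (i + k)
      rw [PySem.List.pyRange_one_cons (by omega)]
      simp only [List.foldl_cons]
      have hstep : kpStepA n k (some (p, i, st)) a = some (p.set i.toNat a, i + k, st) := by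
        simp [kpStepA, hset, if_pos hik]
      rw [hstep]
      exact ih (p.set i.toNat a) (a + 1) (i + k) st (by omega) hik (by simpa using hlen) (by omega)
    · have hstop : kpFill (f + 1) n k (p.set i.toNat a) (a + 1) (i + k) = (p.set i.toNat a, a + 1) := by
        rw [kpFill_succ, if_neg hik]
      rw [hstop]
      rw [PySem.List.pyRange_one_singleton]
      simp only [List.foldl_cons, List.foldl_nil]
      simp [kpStepA, hset, if_neg hik]

theorem kpFoldB_le (n k : Int) : ∀ (l : List Int) (st : List Int × Int),
    st.2 ≤ ((l.foldl (fun st s => kpFill n.toNat n k st.1 st.2 s) st).2) := by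
  intro l
  induction l with
  | nil => intro st; exact le_refl _
  | cons x xs ih =>
    intro st
    simp only [List.foldl_cons]
    exact le_trans (kpFill_le n.toNat n k st.1 st.2 x) (ih (kpFill n.toNat n k st.1 st.2 x))

theorem kpFoldB_snd (n k : Int) (hk : 1 ≤ k) (hn : 1 ≤ n) : ∀ (c : Nat) (s : Int) (p : List Int) (a : Int),
    0 ≤ s → s ≤ min k n → (min k n - s).toNat = c →
    (((PySem.List.pyRange s (min k n) 1).foldl (fun st s' => kpFill n.toNat n k st.1 st.2 s') (p, a)).2)
      = a + ((PySem.List.pyRange s (min k n) 1).map (fun x => (n - 1 - x) / k + 1)).sum := by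
  intro c
  induction c with
  | zero =>
    intro s p a h0 h1 h2
    have hMs : min k n ≤ s := by omega
    rw [PySem.List.pyRange_one_eq_nil hMs]
    simp
  | succ c ih =>
    intro s p a h0 h1 h2
    have hs : s < min k n := by omega
    have hsn : s < n := lt_of_lt_of_le hs (min_le_right _ _)
    rw [PySem.List.pyRange_one_cons hs]
    simp only [List.foldl_cons, List.map_cons, List.sum_cons]
    rw [show kpFill n.toNat n k p a s
          = ((kpFill n.toNat n k p a s).1, (kpFill n.toNat n k p a s).2) from rfl]
    rw [ih (s + 1) (kpFill n.toNat n k p a s).1 (kpFill n.toNat n k p a s).2 (by omega) (by omega) (by omega)]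
    rw [kpFill_snd n k hk n.toNat p a s h0 hsn (by omega)]
    ring

-- Nat form of the counting identity: the chains starting at 0, 1, …, min k n − 1 together cover all n cells
theorem kpNatSum (K : Nat) (hK : 1 ≤ K) : ∀ (N : Nat),
    (∑ s ∈ Finset.range (min K N), ((N - 1 - s) / K + 1)) = N := by
  intro N
  induction N with
  | zero => simp
  | succ N ih =>
    by_cases hNK : N < K
    · have h1 : min K (N + 1) = N + 1 := by omega
      have h2 : min K N = N := by omega
      rw [h2] at ih
      rw [h1, Finset.sum_range_succ]
      have hcg : ∀ s ∈ Finset.range N, (N + 1 - 1 - s) / K + 1 = (N - 1 - s) / K + 1 := by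
        intro s hs
        simp only [Finset.mem_range] at hs
        have e1 : (N - s) / K = 0 := Nat.div_eq_of_lt (by omega)
        have e2 : (N - 1 - s) / K = 0 := Nat.div_eq_of_lt (by omega)
        have e3 : N + 1 - 1 - s = N - s := by omega
        rw [e3, e1, e2]
      rw [Finset.sum_congr rfl hcg, ih]
      have : (N + 1 - 1 - N) / K + 1 = 1 := by
        have : N + 1 - 1 - N = 0 := by omega
        rw [this, Nat.zero_div]
      rw [this]
    · have hKN : K ≤ N := by omega
      have h1 : min K (N + 1) = K := by omega
      have h2 : min K N = K := by omega
      rw [h2] at ih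
      rw [h1]
      have key : ∀ s ∈ Finset.range K, (N + 1 - 1 - s) / K + 1
          = ((N - 1 - s) / K + 1) + (if K ∣ N - s then 1 else 0) := by
        intro s hs
        simp only [Finset.mem_range] at hs
        have e3 : N + 1 - 1 - s = N - s := by omega
        have e4 : N - s = (N - 1 - s) + 1 := by omega
        have hstep : (N - s) / K = (N - 1 - s) / K + (if K ∣ N - s then 1 else 0) := by
          rw [e4, Nat.succ_div, ← e4]
        rw [e3, hstep]
        ring
      rw [Finset.sum_congr rfl key, Finset.sum_add_distrib, ih]
      have hone : (∑ s ∈ Finset.range K, if K ∣ N - s then 1 else 0) = 1 := by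
        have hmem : N % K ∈ Finset.range K := by
          simp only [Finset.mem_range]
          exact Nat.mod_lt N (by omega)
        have hcg2 : ∀ s ∈ Finset.range K, (if K ∣ N - s then 1 else 0)
            = (if s = N % K then (1 : ℕ) else 0) := by
          intro s hs
          simp only [Finset.mem_range] at hs
          by_cases hd : s = N % K
          · subst hd
            have hdm := Nat.div_add_mod N K
            have hdvd : K ∣ N - N % K := ⟨N / K, by omega⟩
            rw [if_pos hdvd, if_pos rfl]
          · rw [if_neg hd]
            have hnd : ¬ K ∣ N - s := by
              intro hdvd
              rcases hdvd with ⟨t, ht⟩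
              have hNs : N = K * t + s := by omega
              have : N % K = s := by
                rw [hNs, Nat.mul_add_mod, Nat.mod_eq_of_lt hs]
              exact hd this.symm
            rw [if_neg hnd]
        rw [Finset.sum_congr rfl hcg2, Finset.sum_ite_eq' (Finset.range K) (N % K) (fun _ => (1 : ℕ)),
          if_pos hmem]
      rw [hone]

theorem kpListSum (f : Nat → Nat) : ∀ (m : Nat),
    ((List.range m).map f).sum = ∑ s ∈ Finset.range m, f s := by
  intro m
  induction m with
  | zero => simp
  | succ m ih => rw [List.range_succ, List.map_append, List.sum_append, Finset.sum_range_succ, ih]; simp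

theorem kpMapSum (n k : Int) (hk : 1 ≤ k) (hn : 1 ≤ n) :
    ((PySem.List.pyRange 0 (min k n) 1).map (fun x => (n - 1 - x) / k + 1)).sum = n := by
  have hm : (min k n - 0).toNat = min k.toNat n.toNat := by
    rcases le_total k n with h | h
    · rw [min_eq_left h, min_eq_left (by omega : k.toNat ≤ n.toNat)]; omega
    · rw [min_eq_right h, min_eq_right (by omega : n.toNat ≤ k.toNat)]; omega
  rw [PySem.List.pyRange_one, hm]
  rw [List.map_map]
  have hcg : ∀ x ∈ List.range (min k.toNat n.toNat),
      ((fun x => (n - 1 - x) / k + 1) ∘ fun j : Nat => (0 : Int) + ↑j) x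
        = (fun j : Nat => (((n.toNat - 1 - j) / k.toNat + 1 : Nat) : Int)) x := by
    intro j hj
    simp only [List.mem_range] at hj
    simp only [Function.comp]
    have e1 : n - 1 - (j : Int) = ((n.toNat - 1 - j : Nat) : Int) := by omega
    push_cast
    simp only [zero_add]
    rw [e1]
    congr 1
    · congr 1
      omega
  rw [List.map_congr_left hcg]
  rw [show (fun j : Nat => (((n.toNat - 1 - j) / k.toNat + 1 : Nat) : Int))
        = (fun x : Nat => ((x : Nat) : Int)) ∘ (fun j : Nat => ((n.toNat - 1 - j) / k.toNat + 1 : Nat)) from rfl]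
  rw [← List.map_map, ← Nat.cast_list_sum]
  rw [kpListSum (fun j : Nat => (n.toNat - 1 - j) / k.toNat + 1) (min k.toNat n.toNat)]
  rw [kpNatSum k.toNat (by omega) n.toNat]
  omega

-- the outer induction: A's fold over the remaining values equals the fold over the remaining chains
theorem kp_outer (n k : Int) (hk : 1 ≤ k) (hn : 1 ≤ n) : ∀ (c : Nat) (s : Int) (p : List Int) (a : Int),
    0 ≤ s → s ≤ min k n → (min k n - s).toNat = c → (p.length : Int) = n →
    (PySem.List.pyRange a (((PySem.List.pyRange s (min k n) 1).foldl (fun st s' => kpFill n.toNat n k st.1 st.2 s') (p, a)).2) 1).foldl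
        (kpStepA n k) (some (p, s, s + 1))
      = some ((((PySem.List.pyRange s (min k n) 1).foldl (fun st s' => kpFill n.toNat n k st.1 st.2 s') (p, a)).1), min k n, min k n + 1) := by
  intro c
  induction c with
  | zero =>
    intro s p a h0 h1 h2 hlen
    have hMs : min k n ≤ s := by omega
    have hsM : s = min k n := le_antisymm h1 hMs
    rw [PySem.List.pyRange_one_eq_nil hMs]
    simp only [List.foldl_nil]
    rw [PySem.List.pyRange_one_eq_nil (le_refl ((p, a).2))]
    simp only [List.foldl_nil, hsM]
  | succ c ih =>
    intro s p a h0 h1 h2 hlen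
    have hs : s < min k n := by omega
    have hsn : s < n := lt_of_lt_of_le hs (min_le_right _ _)
    rw [PySem.List.pyRange_one_cons hs]
    simp only [List.foldl_cons]
    rw [show kpFill n.toNat n k p a s
          = ((kpFill n.toNat n k p a s).1, (kpFill n.toNat n k p a s).2) from rfl]
    have hlen1 : (((kpFill n.toNat n k p a s).1).length : Int) = n := by
      rw [kpFill_length]; exact hlen
    have hrec := ih (s + 1) (kpFill n.toNat n k p a s).1 (kpFill n.toNat n k p a s).2
      (by omega) (by omega) (by omega) hlen1
    have ha1 : a ≤ (kpFill n.toNat n k p a s).2 := kpFill_le n.toNat n k p a s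
    have ha2 : (kpFill n.toNat n k p a s).2
        ≤ ((PySem.List.pyRange (s + 1) (min k n) 1).foldl (fun st s' => kpFill n.toNat n k st.1 st.2 s')
            ((kpFill n.toNat n k p a s).1, (kpFill n.toNat n k p a s).2)).2 :=
      kpFoldB_le n k (PySem.List.pyRange (s + 1) (min k n) 1) _
    rw [PySem.List.pyRange_one_append a (kpFill n.toNat n k p a s).2 _ ha1 ha2]
    rw [List.foldl_append]
    obtain ⟨f, hf⟩ : ∃ f, n.toNat = f + 1 := ⟨n.toNat - 1, by omega⟩
    have hchain : (PySem.List.pyRange a (kpFill n.toNat n k p a s).2 1).foldl (kpStepA n k) (some (p, s, s + 1))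
        = some ((kpFill n.toNat n k p a s).1, s + 1, s + 1 + 1) := by
      have h := kp_chain n k hk f p a s (s + 1) h0 hsn hlen (by omega)
      rw [← hf] at h
      exact h
    rw [hchain]
    exact hrec

-- A equals the chain-fold ghost (for 1 ≤ k, 1 ≤ n)
theorem kpA_eq_fold (n k : Int) (hk : 1 ≤ k) (hn : 1 ≤ n) :
    klever_permutation n k = (kpFold n k).1 := by
  unfold klever_permutation kpFold
  have hMnn : (0 : Int) ≤ min k n := le_min (by omega) (by omega)
  have houter := kp_outer n k hk hn (min k n - 0).toNat 0 (List.replicate n.toNat (-1)) 1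
    (le_refl 0) hMnn rfl (by simp; omega)
  have hsnd := kpFoldB_snd n k hk hn (min k n - 0).toNat 0 (List.replicate n.toNat (-1)) 1
    (le_refl 0) hMnn rfl
  rw [hsnd, kpMapSum n k hk hn] at houter
  rw [show (1 : Int) + n = n + 1 from by ring] at houter
  simp only [zero_add] at houter
  rw [houter]

-- ===== closed-form side =====

-- prefix count: total length of the chains for offsets 0 … t−1
def kpPref (n k t : Int) : Int := t * (n / k) + min t (n % k)

-- one chain's length in prefix form
theorem kpLenPref (n k s : Int) (hk : 1 ≤ k) (h0 : 0 ≤ s) (hsk : s < k) (hsn : s < n) :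
    (n - 1 - s) / k + 1 = kpPref n k (s + 1) - kpPref n k s := by
  have hk0 : k ≠ 0 := by omega
  have hdm : k * (n / k) + n % k = n := Int.ediv_add_emod n k
  have hr0 : 0 ≤ n % k := Int.emod_nonneg n hk0
  have hrk : n % k < k := Int.emod_lt_of_pos n (by omega)
  have key : (n - 1 - s) / k + 1 = n / k + (if s < n % k then 1 else 0) := by
    by_cases hs : s < n % k
    · have e : n - 1 - s = (n % k - 1 - s) + (n / k) * k := by linarith [hdm]
      rw [e, Int.add_mul_ediv_right _ _ hk0,
        Int.ediv_eq_zero_of_lt (by omega) (by omega), if_pos hs]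
      ring
    · have e : n - 1 - s = (n % k - 1 - s + k) + (n / k - 1) * k := by linarith [hdm]
      rw [e, Int.add_mul_ediv_right _ _ hk0,
        Int.ediv_eq_zero_of_lt (by omega) (by omega), if_neg hs]
      ring
  rw [key]
  unfold kpPref
  have hq : (s + 1) * (n / k) = s * (n / k) + n / k := by ring
  rcases le_or_gt (n % k) s with h | h
  · rw [if_neg (by omega), min_eq_right (by omega : n % k ≤ s + 1), min_eq_right h]
    omega
  · rw [if_pos h, min_eq_left (by omega : s + 1 ≤ n % k), min_eq_left (by omega : s ≤ n % k)]
    omega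

-- elementwise effect of one chain: positions i, i+k, … get a, a+1, …, the rest are untouched
theorem kpFill_get (n k : Int) (hk : 1 ≤ k) : ∀ (fuel : Nat) (p : List Int) (a i : Int) (j : Nat),
    0 ≤ i → p.length = n.toNat → n.toNat - i.toNat ≤ fuel →
    ((kpFill fuel n k p a i).1)[j]? =
      if i ≤ (j : Int) ∧ (j : Int) < n ∧ k ∣ ((j : Int) - i) then some (a + ((j : Int) - i) / k)
      else p[j]? := by
  intro fuel
  induction fuel with
  | zero =>
    intro p a i j h0 hlen hf
    rw [show kpFill 0 n k p a i = (p, a) from rfl, if_neg]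
    rintro ⟨h1, h2, _⟩
    omega
  | succ f ih =>
    intro p a i j h0 hlen hf
    rw [kpFill_succ]
    by_cases hin : i < n
    · rw [if_pos hin]
      rw [ih (p.set i.toNat a) (a + 1) (i + k) j (by omega) (by simpa using hlen) (by omega)]
      by_cases hc : i ≤ (j : Int) ∧ (j : Int) < n ∧ k ∣ ((j : Int) - i)
      · rw [if_pos hc]
        obtain ⟨h1, h2, m, hm⟩ := hc
        by_cases hji : (j : Int) = i
        · rw [if_neg (by rintro ⟨h3, -, -⟩; omega)]
          rw [List.getElem?_set]
          rw [if_pos (by omega)]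
          rw [if_pos (by omega)]
          rw [show (j : Int) - i = 0 by omega, Int.zero_ediv, add_zero]
        · have hm1 : 0 < k * m := by omega
          have hmpos : 1 ≤ m := by
            by_contra hcon
            push_neg at hcon
            have := mul_nonpos_of_nonneg_of_nonpos (show (0 : Int) ≤ k by omega)
              (show m ≤ 0 by omega)
            omega
          have hk' : k * 1 ≤ k * m := mul_le_mul_of_nonneg_left hmpos (by omega)
          have hjk : i + k ≤ (j : Int) := by rw [mul_one] at hk'; omega
          rw [if_pos ⟨hjk, h2, m - 1, by
            have hx : k * (m - 1) = k * m - k := by ring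
            omega⟩]
          have : ((j : Int) - i) / k = ((j : Int) - (i + k)) / k + 1 := by
            rw [show (j : Int) - i = ((j : Int) - (i + k)) + 1 * k by ring,
              Int.add_mul_ediv_right _ _ (show k ≠ 0 by omega)]
          rw [this]
          congr 1
          ring
      · rw [if_neg hc, if_neg]
        · have hji : i.toNat ≠ j := by
            intro hji
            exact hc ⟨by omega, by omega, by
              rw [show (j : Int) - i = 0 by omega]; exact dvd_zero k⟩
          rw [List.getElem?_set, if_neg hji]
        · rintro ⟨h1, h2, m, hm⟩
          refine hc ⟨by omega, h2, m + 1, by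
            have hx : k * (m + 1) = k * m + k := by ring
            omega⟩
    · rw [if_neg hin, if_neg]
      rintro ⟨h1, h2, -⟩
      omega

-- the fold preserves the length
theorem kpFoldB_len (n k : Int) : ∀ (l : List Int) (st : List Int × Int),
    ((l.foldl (fun st s => kpFill n.toNat n k st.1 st.2 s) st).1).length = st.1.length := by
  intro l
  induction l with
  | nil => intro st; rfl
  | cons x xs ih =>
    intro st
    simp only [List.foldl_cons]
    rw [ih (kpFill n.toNat n k st.1 st.2 x)]
    exact kpFill_length n.toNat n k st.1 st.2 x

-- elementwise value of the chain-fold: position j of residue t = j % k gets a + pref t − pref s + j / k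
theorem kpOuterGet (n k : Int) (hk : 1 ≤ k) (hn : 1 ≤ n) : ∀ (c : Nat) (s : Int) (p : List Int) (a : Int) (j : Nat),
    0 ≤ s → s ≤ min k n → (min k n - s).toNat = c → p.length = n.toNat → j < n.toNat →
    (((PySem.List.pyRange s (min k n) 1).foldl (fun st s' => kpFill n.toNat n k st.1 st.2 s') (p, a)).1)[j]? =
      if s ≤ (j : Int) % k then some (a + (kpPref n k ((j : Int) % k) - kpPref n k s) + (j : Int) / k)
      else p[j]? := by
  intro c
  induction c with
  | zero =>
    intro s p a j h0 h1 h2 hlen hj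
    have hMs : min k n ≤ s := by omega
    rw [PySem.List.pyRange_one_eq_nil hMs]
    simp only [List.foldl_nil]
    rw [if_neg]
    have hq : 0 ≤ (j : Int) / k := Int.ediv_nonneg (by omega) (by omega)
    have hdm : k * ((j : Int) / k) + (j : Int) % k = (j : Int) := Int.ediv_add_emod _ k
    have hkq : 0 ≤ k * ((j : Int) / k) := mul_nonneg (by omega) hq
    have hjn : ((j : Int)) % k < n := by
      have h1' : (j : Int) % k ≤ (j : Int) := by omega
      omega
    have hjk : (j : Int) % k < k := Int.emod_lt_of_pos _ (by omega)
    omega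
  | succ c ih =>
    intro s p a j h0 h1 h2 hlen hj
    have hs : s < min k n := by omega
    have hsn : s < n := lt_of_lt_of_le hs (min_le_right _ _)
    have hsk : s < k := lt_of_lt_of_le hs (min_le_left _ _)
    rw [PySem.List.pyRange_one_cons hs]
    simp only [List.foldl_cons]
    rw [show kpFill n.toNat n k p a s
          = ((kpFill n.toNat n k p a s).1, (kpFill n.toNat n k p a s).2) from rfl]
    rw [ih (s + 1) (kpFill n.toNat n k p a s).1 (kpFill n.toNat n k p a s).2 j
      (by omega) (by omega) (by omega) (by rw [kpFill_length]; exact hlen) hj]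
    have hsnd := kpFill_snd n k hk n.toNat p a s h0 hsn (by omega)
    have hlp := kpLenPref n k s hk h0 hsk hsn
    have hget := kpFill_get n k hk n.toNat p a s j h0 hlen (by omega)
    have hdm : k * ((j : Int) / k) + (j : Int) % k = (j : Int) := Int.ediv_add_emod _ k
    have hq : 0 ≤ (j : Int) / k := Int.ediv_nonneg (by omega) (by omega)
    have hkq : 0 ≤ k * ((j : Int) / k) := mul_nonneg (by omega) hq
    have hjk : (j : Int) % k < k := Int.emod_lt_of_pos _ (by omega)
    have hjm0 : 0 ≤ (j : Int) % k := Int.emod_nonneg _ (by omega)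
    by_cases h1' : s + 1 ≤ (j : Int) % k
    · rw [if_pos h1', if_pos (by omega)]
      rw [hsnd, hlp]
      congr 1
      ring
    · rw [if_neg h1']
      by_cases h2' : s ≤ (j : Int) % k
      · -- j % k = s : this chain writes position j
        have hjs : (j : Int) % k = s := by omega
        rw [if_pos h2', hget, if_pos]
        · have hd : (j : Int) - s = k * ((j : Int) / k) := by omega
          rw [hd, Int.mul_ediv_cancel_left _ (show k ≠ 0 by omega), hjs]
          rw [show kpPref n k s - kpPref n k s = 0 by ring, add_zero]
        · exact ⟨by omega, by omega, (j : Int) / k, by omega⟩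
      · -- j % k < s : untouched by this chain
        rw [if_neg h2', hget, if_neg]
        rintro ⟨hle, -, m, hm⟩
        have hjs : (j : Int) % k = s % k := by
          rw [show (j : Int) = s + k * m by omega, Int.add_mul_emod_self_left]
        rw [Int.emod_eq_of_lt h0 hsk] at hjs
        omega

-- B's closed form equals the chain-fold ghost (for 1 ≤ k, 1 ≤ n)
theorem kpAlt_eq_fold (n k : Int) (hk : 1 ≤ k) (hn : 1 ≤ n) :
    klever_permutation_alt n k = (kpFold n k).1 := by
  have hk0 : k ≠ 0 := by omega
  have hkpos : (0 : Int) < k := by omega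
  unfold klever_permutation_alt
  have hdq : PySem.Int.divmod? n k = some (PySem.Int.floordiv n k, PySem.Int.mod n k) := by
    simp [PySem.Int.divmod?, PySem.Int.floordiv, PySem.Int.mod, hk0]
  simp only [hdq, PySem.Int.floordiv_eq_ediv_of_pos hkpos, PySem.Int.mod_eq_emod_of_pos hkpos]
  have hMnn : (0 : Int) ≤ min k n := le_min (by omega) (by omega)
  apply List.ext_getElem?
  intro j
  have hlenB : ((PySem.List.pyRange 0 n 1).map (fun i =>
      (i % k) * (n / k) + min (i % k) (n % k) + i / k + 1)).length = n.toNat := by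
    rw [List.length_map, PySem.List.length_pyRange_one]
    omega
  have hlenF : ((kpFold n k).1).length = n.toNat := by
    unfold kpFold
    rw [kpFoldB_len]
    simp
  by_cases hj : j < n.toNat
  · rw [List.getElem?_map, PySem.List.getElem?_pyRange_one,
      if_pos (show j < ((n : Int) - 0).toNat by omega)]
    simp only [Option.map_some, zero_add]
    have hfold := kpOuterGet n k hk hn (min k n - 0).toNat 0 (List.replicate n.toNat (-1)) 1 j
      (le_refl 0) hMnn rfl (by simp) hj
    rw [if_pos (Int.emod_nonneg _ hk0)] at hfold
    unfold kpFold
    rw [hfold]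
    congr 1
    unfold kpPref
    have hmin0 : min (0 : Int) (n % k) = 0 := min_eq_left (Int.emod_nonneg n hk0)
    rw [hmin0]
    ring
  · rw [List.getElem?_eq_none (by omega), List.getElem?_eq_none (by omega)]

-- ===== VERDICT (by name: the statement is the Claim_ definition above) =====
theorem klever_permutation_spec : Claim_equal_klever_permutation := by
  intro n k hdom hpre
  show klever_permutation n k = klever_permutation_alt n k
  rcases hpre with hk | ⟨hn0, hkneg⟩
  · by_cases hn : (1 : Int) ≤ n
    · rw [kpA_eq_fold n k hk hn, kpAlt_eq_fold n k hk hn]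
    · -- n ≤ 0: both sides are []
      unfold klever_permutation klever_permutation_alt
      rw [PySem.List.pyRange_one_eq_nil (show n + 1 ≤ 1 by omega)]
      have hdq : PySem.Int.divmod? n k = some (PySem.Int.floordiv n k, PySem.Int.mod n k) := by
        simp [PySem.Int.divmod?, PySem.Int.floordiv, PySem.Int.mod, show k ≠ 0 by omega]
      rw [PySem.List.pyRange_one_eq_nil (show n ≤ 0 by omega)]
      simp [hdq, show n.toNat = 0 by omega]
  · -- n ≤ 0, k < 0: both sides are []
    unfold klever_permutation klever_permutation_alt
    rw [PySem.List.pyRange_one_eq_nil (show n + 1 ≤ 1 by omega)]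
    have hdq : PySem.Int.divmod? n k = some (PySem.Int.floordiv n k, PySem.Int.mod n k) := by
      simp [PySem.Int.divmod?, PySem.Int.floordiv, PySem.Int.mod, show k ≠ 0 by omega]
    rw [PySem.List.pyRange_one_eq_nil (show n ≤ 0 by omega)]
    simp [hdq, show n.toNat = 0 by omega]
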